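-- pv_equiv track=rewrite | github.com/Legio17/NEETS_Sequence_Generator | Collection.py | cutNull
-- ===== SOURCE A (Python) =====
-- def cutNull(string, nrType):
--
--     ingnoreRest = "false";
--     new_string = "ERROR";
--
--     if (nrType == "HEX"):
--         diff = len(string) % 2
--         string = (("0")*diff) + string
--
--         for x in range(0, len(string), 2):
--             if(string[x:x+2]== "00"):
--                 pass
--             else:
--                 string = string[x:]
--                 return string
--
--     return new_string
-- ===== SOURCE B (Python) =====
-- def cutNull(string, nrType):
--     if nrType != "HEX":
--         return "ERROR"
--     padded = "0" * (len(string) % 2) + string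
--     t = padded.lstrip("0")
--     if (len(padded) - len(t)) % 2:
--         t = "0" + t
--     return t or "ERROR"
-- ===== Notes on version B (the rewrite author's own statement) =====
-- stated objective: simpler
-- what changed: Instead of A's index loop that inspects the hex string pair by pair, B counts the leading run of '0' characters once with lstrip, re-adds one '0' if an odd number was removed (keeping the stripping pair-aligned), and maps the empty result to 'ERROR'.
import Mathlib
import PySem

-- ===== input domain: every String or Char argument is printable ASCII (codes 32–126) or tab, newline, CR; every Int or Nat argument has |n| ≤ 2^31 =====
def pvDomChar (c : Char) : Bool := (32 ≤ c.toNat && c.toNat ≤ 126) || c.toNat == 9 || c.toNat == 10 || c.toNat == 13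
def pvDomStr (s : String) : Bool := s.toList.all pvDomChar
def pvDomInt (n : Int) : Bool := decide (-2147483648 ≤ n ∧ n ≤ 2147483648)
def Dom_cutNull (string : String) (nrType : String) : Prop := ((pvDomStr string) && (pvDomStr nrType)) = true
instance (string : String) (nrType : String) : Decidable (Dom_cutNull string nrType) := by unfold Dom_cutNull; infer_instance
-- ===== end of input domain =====

-- ===== PORT A =====
-- B strips the leading zero-byte pairs with one lstrip + parity fix-up instead of A's pair-by-pair loop (objective: simpler).
-- Loop of A: for x in range(0, len(string), 2): if string[x:x+2]=="00" continue else return string[x:]; fall-through returns "ERROR".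
def cutNullLoopA (s : List Char) (x : Nat) : String :=
  if _ : x < s.length then
    if (s.drop x).take 2 = ['0', '0'] then        -- string[x:x+2] == "00"  (x ≥ 0, so slicing = take 2 after drop x)
      cutNullLoopA s (x + 2)
    else
      String.ofList (s.drop x)                        -- return string[x:]
  else
    "ERROR"                                       -- loop finished: return new_string
termination_by s.length - x

def cutNull (string : String) (nrType : String) : String :=
  if nrType == "HEX" then
    let s := string.toList
    let diff := s.length % 2                      -- diff = len(string) % 2
    let s := List.replicate diff '0' ++ s         -- string = ("0")*diff + string
    cutNullLoopA s 0
  else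
    "ERROR"

-- ===== PORT B =====
def cutNull_alt (string : String) (nrType : String) : String :=
  if nrType != "HEX" then
    "ERROR"
  else
    let padded := List.replicate (string.toList.length % 2) '0' ++ string.toList
    let t := padded.dropWhile (· == '0')          -- padded.lstrip("0")  (exact: drops the leading run of '0')
    -- (len(padded) - len(t)) % 2 : t is a suffix of padded, so Nat subtraction is exact here
    let t := if (padded.length - t.length) % 2 = 1 then '0' :: t else t
    if t.isEmpty then "ERROR" else String.ofList t    -- return t or "ERROR"

-- ===== PRECONDITION & SPEC =====
def Spec_cutNull (string : String) (nrType : String) (out : String) : Prop := out = cutNull_alt string nrType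
instance (string : String) (nrType : String) (out : String) : Decidable (Spec_cutNull string nrType out) := by unfold Spec_cutNull; infer_instance

-- ===== CLAIM (what is proved, stated in full; the proofs are below) =====
def Claim_equal_cutNull : Prop := ∀ (string : String) (nrType : String), Dom_cutNull string nrType → Spec_cutNull string nrType (cutNull string nrType)

-- ===== LEMMAS AND PROOFS =====

-- Proof-only normal form of A's loop: strip leading "00" pairs off the front of the list.
def cutNullAux (s : List Char) : String :=
  if hp : s.take 2 = ['0', '0'] then cutNullAux (s.drop 2)
  else if s = [] then "ERROR" else String.ofList s
termination_by s.length
decreasing_by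
  have h2 : 2 ≤ s.length := by
    have := congrArg List.length hp
    simp [List.length_take] at this
    omega
  simp
  omega

lemma cutNullLoopA_eq_aux (s : List Char) (x : Nat) :
    cutNullLoopA s x = cutNullAux (s.drop x) := by
  fun_induction cutNullLoopA s x with
  | case1 x hx hpair ih =>
      have hdd : (s.drop x).drop 2 = s.drop (x + 2) := by
        rw [List.drop_drop]
      rw [ih]
      conv_rhs => rw [cutNullAux]
      rw [dif_pos hpair, hdd]
  | case2 x hx hpair =>
      conv_rhs => rw [cutNullAux]
      rw [dif_neg hpair, if_neg (by simp; omega)]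
  | case3 x hx =>
      have hnil : s.drop x = [] := by simp; omega
      rw [hnil, cutNullAux]
      simp

lemma cutNullAux_eq_bcore (s : List Char) :
    cutNullAux s =
      (let t := s.dropWhile (· == '0')
       let t := if (s.length - t.length) % 2 = 1 then '0' :: t else t
       if t.isEmpty then "ERROR" else String.ofList t) := by
  fun_induction cutNullAux s with
  | case1 s h ih =>
      obtain ⟨a, b, r, rfl, ha, hb⟩ : ∃ a b r, s = a :: b :: r ∧ a = '0' ∧ b = '0' := by
        rcases s with _ | ⟨a, _ | ⟨b, r⟩⟩ <;> simp_all
      subst ha hb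
      simp only [List.drop_succ_cons, List.drop_zero] at ih ⊢
      rw [ih]
      simp only [List.dropWhile_cons, List.length_cons]
      have hle : (r.dropWhile (· == '0')).length ≤ r.length := List.length_dropWhile_le _ _
      simp only [show ('0' == '0') = true from rfl, if_true]
      have : (r.length + 1 + 1 - (r.dropWhile (· == '0')).length) % 2
           = (r.length - (r.dropWhile (· == '0')).length) % 2 := by omega
      rw [this]
  | case2 h =>
      simp
  | case3 s h =>
      rename_i hnil
      rcases s with _ | ⟨a, r⟩
      · simp at hnil
      by_cases ha : a = '0'
      · subst ha
        rcases r with _ | ⟨b, r'⟩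
        · simp
        · -- dropWhile stops at b (≠ '0'); exactly one '0' was removed, the parity branch puts it back
          have hb : (b == '0') = false := by
            simp only [beq_eq_false_iff_ne]
            intro hb; subst hb; simp at h
          simp [hb]
      · have ha' : (a == '0') = false := beq_eq_false_iff_ne.mpr ha
        simp [ha']

-- ===== VERDICT (by name: the statement is the Claim_ definition above) =====
theorem cutNull_spec : Claim_equal_cutNull := by
  intro string nrType _
  unfold Spec_cutNull cutNull cutNull_alt
  by_cases h : nrType == "HEX"
  · rw [if_pos h]
    simp only [bne, h, Bool.not_true, Bool.false_eq_true, if_false]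
    rw [cutNullLoopA_eq_aux, List.drop_zero, cutNullAux_eq_bcore]
  · rw [if_neg h]
    simp [bne, h]
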